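-- pv_equiv track=rewrite | github.com/quantumlib/Cirq | cirq/value/util.py | sorting_str
-- ===== SOURCE A (Python) =====
-- from typing import Any
--
-- def sorting_str(value: Any) -> str:
--     """A str method with hacks to support better lexicographic ordering.
--
--     These strings are not intended to be human readable.
--
--     The returned string will have digit-runs zero-padded up to at least 8
--     digits. That way, instead of 'a10' coming before 'a2', 'a000010' will come
--     after 'a000002'.
--
--     Also, the original length of each digit-run is appended after the
--     zero-padded run. This is so that 'a0' continues to come before 'a00'.
--     """
--
--     text = str(value)
--
--     was_on_digits = False
--     last_transition = 0
--     chunks = []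
--
--     def handle_transition_at(k):
--         chunk = text[last_transition:k]
--         if was_on_digits:
--             chunk = chunk.rjust(8, '0') + ':' + str(len(chunk))
--         chunks.append(chunk)
--
--     for i in range(len(text)):
--         on_digits = text[i].isdigit()
--         if was_on_digits != on_digits:
--             handle_transition_at(i)
--             was_on_digits = on_digits
--             last_transition = i
--
--     handle_transition_at(len(text))
--     return ''.join(chunks)
-- ===== SOURCE B (Python) =====
-- def _flush(run: str) -> str:
--     return run.rjust(8, '0') + ':' + str(len(run)) if run[0].isdigit() else run
--
--
-- def sorting_str(value) -> str:
--     """Right-to-left fold: scan reversed(text), buffering the pending run and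
--     flushing a formatted piece at class changes; output is built back-to-front."""
--     text = str(value)
--     buf = []       # chars of the pending run, rightmost-first
--     pieces = []    # formatted pieces, rightmost-first
--     for c in reversed(text):
--         if buf and c.isdigit() != buf[-1].isdigit():
--             pieces.append(_flush(''.join(reversed(buf))))
--             buf = [c]
--         else:
--             buf.append(c)
--     if buf:
--         pieces.append(_flush(''.join(reversed(buf))))
--     return ''.join(reversed(pieces))
-- ===== Notes on version B (the rewrite author's own statement) =====
-- stated objective: alternative
-- what changed: Replaces A's left-to-right index loop with transition bookkeeping (was_on_digits/last_transition and a closure appending chunks) by a right-to-left fold over reversed(text) that builds the output back-to-front, keeping only a pending run and the formatted suffix.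
import Mathlib
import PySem

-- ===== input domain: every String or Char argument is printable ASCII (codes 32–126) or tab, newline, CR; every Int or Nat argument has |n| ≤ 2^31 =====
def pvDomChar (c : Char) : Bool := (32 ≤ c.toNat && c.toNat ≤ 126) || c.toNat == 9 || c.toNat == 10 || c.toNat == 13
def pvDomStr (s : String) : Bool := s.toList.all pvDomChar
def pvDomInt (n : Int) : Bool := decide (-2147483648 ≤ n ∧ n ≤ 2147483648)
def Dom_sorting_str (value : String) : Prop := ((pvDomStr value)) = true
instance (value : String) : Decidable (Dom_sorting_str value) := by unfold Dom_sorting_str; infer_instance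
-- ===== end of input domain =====

-- B replaces A's forward transition state machine by a right-to-left fold building the output
-- back-to-front; same output, same O(n) cost. Neither version mutates its argument.

-- ===== PORT A =====
-- chunk.rjust(8, '0') + ':' + str(len(chunk))  — rjust ported by hand (exact: left-pad with '0' to width 8)
def pvPadRun (chunk : List Char) : List Char :=
  List.replicate (8 - chunk.length) '0' ++ chunk ++ ':' :: (PySem.Int.toStr (chunk.length : Int)).toList

-- the closure handle_transition_at(k): text[last_transition:k], padded iff was_on_digits
def pvHandle (text : List Char) (was : Bool) (lt : Nat) (k : Nat) : List Char :=
  let chunk := PySem.List.slice text (some (lt : Int)) (some (k : Int))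
  if was then pvPadRun chunk else chunk

-- one iteration of A's for-loop; state = (was_on_digits, last_transition, chunks)
def pvAStep (text : List Char) (st : Bool × Nat × List (List Char)) (i : Nat) :
    Bool × Nat × List (List Char) :=
  let on := PySem.Chars.isdigit (text.getD i ' ')   -- text[i]; i < len(text) on every loop index
  if st.1 != on then (on, i, st.2.2 ++ [pvHandle text st.1 st.2.1 i]) else st

def sorting_str (value : String) : String :=
  let text := value.toList                          -- str(value) on a str is the string itself
  let st := (List.range text.length).foldl (pvAStep text) (false, 0, [])
  String.ofList (st.2.2 ++ [pvHandle text st.1 st.2.1 text.length]).flatten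

-- ===== PORT B =====
-- _flush(run): run.rjust(8,'0')+':'+str(len(run)) if run[0].isdigit() else run (run never empty)
def pvFlush (run : List Char) : List Char :=
  match run with
  | [] => []
  | c :: _ =>
      if PySem.Chars.isdigit c then
        List.replicate (8 - run.length) '0' ++ run ++ ':' :: (PySem.Int.toStr (run.length : Int)).toList
      else run

-- one step of B's loop over reversed(text); state = (buf, pieces); foldr = scan from the right
-- buf holds the pending run rightmost-first, so buf[-1] is its leftmost (head) char and
-- ''.join(reversed(buf)) is buf.reverse
def pvBStep (c : Char) (st : List Char × List (List Char)) : List Char × List (List Char) :=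
  if st.1 ≠ [] ∧ PySem.Chars.isdigit c ≠ PySem.Chars.isdigit (st.1.getLastD ' ')
  then ([c], st.2 ++ [pvFlush st.1.reverse])
  else (st.1 ++ [c], st.2)

def sorting_str_alt (value : String) : String :=
  let st := value.toList.foldr pvBStep ([], [])
  let pieces := if st.1 ≠ [] then st.2 ++ [pvFlush st.1.reverse] else st.2
  String.ofList pieces.reverse.flatten

-- ===== PRECONDITION & SPEC =====
def Spec_sorting_str (value : String) (out : String) : Prop := out = sorting_str_alt value
instance (value : String) (out : String) : Decidable (Spec_sorting_str value out) := by unfold Spec_sorting_str; infer_instance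

-- ===== CLAIM (what is proved, stated in full; the proofs are below) =====
def Claim_equal_sorting_str : Prop := ∀ (value : String), Dom_sorting_str value → Spec_sorting_str value (sorting_str value)

-- ===== LEMMAS AND PROOFS =====

-- the canonical decomposition into maximal same-digit-class runs, used only by the proofs
def pvRuns : List Char → List (List Char)
  | [] => []
  | c :: rest =>
      (c :: rest.takeWhile (fun x => PySem.Chars.isdigit x == PySem.Chars.isdigit c)) ::
        pvRuns (rest.dropWhile (fun x => PySem.Chars.isdigit x == PySem.Chars.isdigit c))
termination_by l => l.length
decreasing_by
  simpa using Nat.lt_succ_of_le (List.length_dropWhile_le _ _)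

-- the chunk A emits for a closed run of class `was`
def pvEmitRun (was : Bool) (run : List Char) : List Char :=
  if was then pvPadRun run else run

-- A's loop, abstracted: an open run `cur` of class `was`, then the untouched rest
def pvOpenRuns (was : Bool) (cur : List Char) : List Char → List Char
  | [] => pvEmitRun was cur
  | c :: rest =>
      if PySem.Chars.isdigit c == was then pvOpenRuns was (cur ++ [c]) rest
      else pvEmitRun was cur ++ pvOpenRuns (PySem.Chars.isdigit c) [c] rest

theorem pvFlush_cons (c : Char) (l : List Char) :
    pvFlush (c :: l) = pvEmitRun (PySem.Chars.isdigit c) (c :: l) := by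
  simp [pvFlush, pvEmitRun, pvPadRun]

theorem pvOpenRuns_eq_runs (rest : List Char) : ∀ (was : Bool) (cur : List Char),
    pvOpenRuns was cur rest
      = pvEmitRun was (cur ++ rest.takeWhile (fun x => PySem.Chars.isdigit x == was))
        ++ ((pvRuns (rest.dropWhile (fun x => PySem.Chars.isdigit x == was))).map pvFlush).flatten := by
  induction rest with
  | nil => intro was cur; simp [pvOpenRuns, pvRuns]
  | cons c rest ih =>
    intro was cur
    by_cases h : PySem.Chars.isdigit c = was
    · simp [pvOpenRuns, h, ih]
    · have hb : (PySem.Chars.isdigit c == was) = false := by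
        cases hc : PySem.Chars.isdigit c <;> cases was <;> simp_all
      simp only [pvOpenRuns, hb, Bool.false_eq_true, if_false]
      rw [ih (PySem.Chars.isdigit c) [c]]
      simp only [List.takeWhile_cons, List.dropWhile_cons, hb, Bool.false_eq_true, if_false]
      rw [show pvRuns (c :: rest)
            = (c :: rest.takeWhile (fun x => PySem.Chars.isdigit x == PySem.Chars.isdigit c)) ::
              pvRuns (rest.dropWhile (fun x => PySem.Chars.isdigit x == PySem.Chars.isdigit c))
          from by rw [pvRuns]]
      simp [pvFlush_cons, pvEmitRun]

theorem pvHandle_eq (text : List Char) (was : Bool) (lt k : Nat) :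
    pvHandle text was lt k = pvEmitRun was ((text.drop lt).take (k - lt)) := by
  simp [pvHandle, pvEmitRun, PySem.List.slice_natCast]

-- invariant of A's index loop: after processing indices [s, n), the final join equals
-- the already-emitted chunks, the open run text[lt..s) (of class `was`), and the runs of text[s..)
theorem pvLoop_inv (text : List Char) :
    ∀ (m s lt : Nat) (was : Bool) (chunks : List (List Char)),
    s + m = text.length → lt ≤ s →
    (∀ x ∈ (text.drop lt).take (s - lt), PySem.Chars.isdigit x = was) →
    (let st := (List.range' s m).foldl (pvAStep text) (was, lt, chunks)
     (st.2.2 ++ [pvHandle text st.1 st.2.1 text.length]).flatten)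
      = chunks.flatten ++ pvOpenRuns was ((text.drop lt).take (s - lt)) (text.drop s) := by
  intro m
  induction m with
  | zero =>
    intro s lt was chunks hs hlt _
    have hnil : text.drop s = [] := by
      apply List.drop_of_length_le; omega
    simp [List.range', pvHandle_eq, hnil, pvOpenRuns, ← hs]
  | succ m ih =>
    intro s lt was chunks hs hlt hinv
    have hsn : s < text.length := by omega
    have hget : text[s]?.getD ' ' = text[s] := by
      rw [List.getElem?_eq_getElem hsn]; rfl
    have hdrop : text.drop s = text[s] :: text.drop (s + 1) :=
      List.drop_eq_getElem_cons hsn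
    have htake1 : (text.drop s).take 1 = [text[s]] := by rw [hdrop]; rfl
    have htake : (text.drop lt).take (s + 1 - lt)
        = (text.drop lt).take (s - lt) ++ [text[s]] := by
      have hlen : s - lt < (text.drop lt).length := by
        simp [List.length_drop]; omega
      have hg : (text.drop lt)[s - lt] = text[s] := by
        rw [List.getElem_drop]
        congr 1; omega
      rw [show s + 1 - lt = (s - lt) + 1 by omega,
          List.take_add_one, List.getElem?_eq_getElem hlen, hg]
      simp
    have hrange : List.range' s (m + 1) = s :: List.range' (s + 1) m := by
      simp [List.range'_succ]
    by_cases hcase : PySem.Chars.isdigit text[s] = was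
    · -- same class: the state is unchanged
      have hstep : pvAStep text (was, lt, chunks) s = (was, lt, chunks) := by
        simp [pvAStep, List.getD, hget, hcase]
      rw [hrange]
      simp only [List.foldl_cons, hstep]
      rw [ih (s + 1) lt was chunks (by omega) (by omega)
          (by rw [htake]; intro x hx
              rcases List.mem_append.mp hx with hmem | hmem
              · exact hinv x hmem
              · simp at hmem; subst hmem; exact hcase)]
      rw [hdrop, pvOpenRuns]
      simp [hcase, htake]
    · -- class change: emit the closed run, open a new one at s
      have hb : (PySem.Chars.isdigit text[s] == was) = false := by
        cases hc : PySem.Chars.isdigit text[s] <;> cases was <;> simp_all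
      have hstep : pvAStep text (was, lt, chunks) s
          = (PySem.Chars.isdigit text[s], s, chunks ++ [pvHandle text was lt s]) := by
        simp only [pvAStep, List.getD, hget]
        rw [if_pos]
        cases hc : PySem.Chars.isdigit text[s] <;> cases was <;> simp_all
      rw [hrange]
      simp only [List.foldl_cons, hstep]
      rw [ih (s + 1) s (PySem.Chars.isdigit text[s]) (chunks ++ [pvHandle text was lt s])
          (by omega) (by omega)
          (by intro x hx
              rw [show s + 1 - s = 1 by omega, htake1] at hx
              simp at hx; simp [hx])]
      rw [hdrop, pvOpenRuns]
      simp only [hb, Bool.false_eq_true, if_false,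
        show s + 1 - s = 1 by omega, pvHandle_eq]
      simp
      rw [htake1]

-- A's result, characterised: the flush of each maximal run, joined
theorem pvA_eq_runs (value : String) :
    sorting_str value = String.ofList ((pvRuns value.toList).map pvFlush).flatten := by
  have h := pvLoop_inv value.toList value.toList.length 0 0 false []
    (by omega) (by omega) (by simp)
  rw [← List.range_eq_range'] at h
  simp only [Nat.sub_zero, List.drop_zero, List.take_zero, List.flatten_nil,
    List.nil_append] at h
  have key : pvOpenRuns false [] value.toList
      = ((pvRuns value.toList).map pvFlush).flatten := by
    rw [pvOpenRuns_eq_runs]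
    cases hT : value.toList with
    | nil => simp [pvRuns, pvEmitRun]
    | cons c rest =>
      by_cases hd : PySem.Chars.isdigit c
      · simp [hd, pvEmitRun]
      · rw [show pvRuns (c :: rest)
              = (c :: rest.takeWhile (fun x => PySem.Chars.isdigit x == PySem.Chars.isdigit c)) ::
                pvRuns (rest.dropWhile (fun x => PySem.Chars.isdigit x == PySem.Chars.isdigit c))
            from by rw [pvRuns]]
        simp [pvFlush_cons, pvEmitRun, hd]
  exact congrArg String.ofList (h.trans key)

-- B's foldr, characterised: for a nonempty string, the pending run is the first maximal run
-- and the built suffix is the joined flushes of the remaining runs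
theorem pvB_foldr_runs : ∀ (c : Char) (rest : List Char),
    (c :: rest).foldr pvBStep ([], [])
      = ((c :: rest.takeWhile (fun x => PySem.Chars.isdigit x == PySem.Chars.isdigit c)).reverse,
         ((pvRuns (rest.dropWhile (fun x => PySem.Chars.isdigit x == PySem.Chars.isdigit c))).map pvFlush).reverse) := by
  intro c rest
  induction rest generalizing c with
  | nil => simp [pvBStep, pvRuns]
  | cons d rest ih =>
    simp only [List.foldr_cons] at *
    rw [ih d]
    have hlast : ((d :: rest.takeWhile (fun x => PySem.Chars.isdigit x == PySem.Chars.isdigit d)).reverse).getLastD ' ' = d := by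
      simp
    by_cases h : PySem.Chars.isdigit c = PySem.Chars.isdigit d
    · have hpred : (fun x => PySem.Chars.isdigit x == PySem.Chars.isdigit d)
          = (fun x => PySem.Chars.isdigit x == PySem.Chars.isdigit c) := by
        funext x; rw [h]
      simp [pvBStep, hpred, h]
    · have hb2 : (PySem.Chars.isdigit d == PySem.Chars.isdigit c) = false := by
        cases hc : PySem.Chars.isdigit c <;> cases hd : PySem.Chars.isdigit d <;> simp_all
      rw [pvBStep, if_pos ⟨by simp, by rw [hlast]; exact h⟩]
      simp only [List.takeWhile_cons, List.dropWhile_cons, hb2, Bool.false_eq_true, if_false]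
      rw [show pvRuns (d :: rest)
            = (d :: rest.takeWhile (fun x => PySem.Chars.isdigit x == PySem.Chars.isdigit d)) ::
              pvRuns (rest.dropWhile (fun x => PySem.Chars.isdigit x == PySem.Chars.isdigit d))
          from by rw [pvRuns]]
      simp

theorem pvB_eq_runs (value : String) :
    sorting_str_alt value = String.ofList ((pvRuns value.toList).map pvFlush).flatten := by
  unfold sorting_str_alt
  cases hT : value.toList with
  | nil => simp [pvRuns]
  | cons c rest =>
    rw [pvB_foldr_runs c rest]
    rw [show pvRuns (c :: rest)
          = (c :: rest.takeWhile (fun x => PySem.Chars.isdigit x == PySem.Chars.isdigit c)) ::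
            pvRuns (rest.dropWhile (fun x => PySem.Chars.isdigit x == PySem.Chars.isdigit c))
        from by rw [pvRuns]]
    simp

-- ===== VERDICT (by name: the statement is the Claim_ definition above) =====
theorem sorting_str_spec : Claim_equal_sorting_str := by
  intro value _
  show sorting_str value = sorting_str_alt value
  rw [pvA_eq_runs, pvB_eq_runs]
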